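-- pv_equiv track=rewrite | github.com/paulklemstine/factor | forbidden_residue_analysis.py | analyze_qr_structure
-- ===== SOURCE A (Python) =====
-- def compute_phi_image(p):
--     """Image of phi(m,n)=(m^2-n^2, 2mn) with swaps, over (Z/pZ)^2 \\ {(0,0)}."""
--     image = set()
--     for m in range(p):
--         for n in range(p):
--             if m == 0 and n == 0:
--                 continue
--             a = (m*m - n*n) % p
--             b = (2*m*n) % p
--             image.add((a, b))
--             image.add((b, a))
--     return image
--
-- def analyze_qr_structure(p):
--     """Classify each (a,b) by whether a^2+b^2 is 0, QR, or NQR."""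
--     qr = set()
--     for x in range(p):
--         qr.add((x*x) % p)
--
--     phi_img = compute_phi_image(p) if p <= 73 else None
--
--     counts = {'0_hit': 0, '0_miss': 0, 'qr_hit': 0, 'qr_miss': 0, 'nqr_hit': 0, 'nqr_miss': 0}
--
--     if phi_img:
--         for a in range(p):
--             for b in range(p):
--                 s = (a*a + b*b) % p
--                 hit = (a, b) in phi_img
--                 if s == 0:
--                     counts['0_hit' if hit else '0_miss'] += 1
--                 elif s in qr:
--                     counts['qr_hit' if hit else 'qr_miss'] += 1
--                 else:
--                     counts['nqr_hit' if hit else 'nqr_miss'] += 1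
--
--     return counts
-- ===== SOURCE B (Python) =====
-- def compute_phi_image(p):
--     """Image of phi(m,n)=(m^2-n^2, 2mn) with swaps, over (Z/pZ)^2 \\ {(0,0)}."""
--     image = set()
--     for m in range(p):
--         for n in range(p):
--             if m == 0 and n == 0:
--                 continue
--             a = (m*m - n*n) % p
--             b = (2*m*n) % p
--             image.add((a, b))
--             image.add((b, a))
--     return image
--
-- def analyze_qr_structure(p):
--     """Two passes: per-class grid totals, then hits counted over phi_img itself."""
--     qr = set()
--     for x in range(p):
--         qr.add((x*x) % p)
--
--     phi_img = compute_phi_image(p) if p <= 73 else None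
--
--     counts = {'0_hit': 0, '0_miss': 0, 'qr_hit': 0, 'qr_miss': 0, 'nqr_hit': 0, 'nqr_miss': 0}
--
--     if phi_img:
--         total_0 = total_qr = total_nqr = 0
--         for a in range(p):
--             for b in range(p):
--                 s = (a*a + b*b) % p
--                 if s == 0:
--                     total_0 += 1
--                 elif s in qr:
--                     total_qr += 1
--                 else:
--                     total_nqr += 1
--         hit_0 = hit_qr = hit_nqr = 0
--         for (a, b) in phi_img:
--             s = (a*a + b*b) % p
--             if s == 0:
--                 hit_0 += 1
--             elif s in qr:
--                 hit_qr += 1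
--             else:
--                 hit_nqr += 1
--         counts = {'0_hit': hit_0, '0_miss': total_0 - hit_0,
--                   'qr_hit': hit_qr, 'qr_miss': total_qr - hit_qr,
--                   'nqr_hit': hit_nqr, 'nqr_miss': total_nqr - hit_nqr}
--
--     return counts
-- ===== Notes on version B (the rewrite author's own statement) =====
-- stated objective: alternative
-- what changed: The single classify-and-membership-test double loop over the grid is replaced by two differently-shaped passes: one grid pass accumulating per-class totals in three plain counters, and a second pass iterating directly over the elements of phi_img to count per-class hits, with misses obtained as total minus hits.
import Mathlib
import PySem

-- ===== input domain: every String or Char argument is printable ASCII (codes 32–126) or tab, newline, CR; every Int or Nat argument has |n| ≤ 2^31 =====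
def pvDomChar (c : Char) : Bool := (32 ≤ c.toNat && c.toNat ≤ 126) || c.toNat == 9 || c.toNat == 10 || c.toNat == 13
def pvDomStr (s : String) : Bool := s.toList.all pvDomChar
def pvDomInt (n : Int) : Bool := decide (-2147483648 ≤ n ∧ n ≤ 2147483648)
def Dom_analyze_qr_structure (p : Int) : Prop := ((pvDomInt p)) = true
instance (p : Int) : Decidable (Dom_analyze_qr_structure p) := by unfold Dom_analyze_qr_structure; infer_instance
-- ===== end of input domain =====

-- B replaces A's single classify-and-membership-test grid loop by two passes (per-class grid
-- totals, then hits counted by iterating over phi_img itself; miss = total - hit): alternative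
-- decomposition, same asymptotic cost.

-- ===== PORT A =====
-- shared helper (identical function in Source A and Source B)
def compute_phi_image (p : Int) : PySem.Set (Int × Int) :=
  (PySem.List.pyRange 0 p 1).foldl (fun image m =>
    (PySem.List.pyRange 0 p 1).foldl (fun image n =>
      if m = 0 ∧ n = 0 then image
      else
        let a := PySem.Int.mod (m*m - n*n) p
        let b := PySem.Int.mod (2*m*n) p
        PySem.Set.add (PySem.Set.add image (a, b)) (b, a)) image)
    PySem.Set.empty

def analyze_qr_structure (p : Int) : List (String × Int) :=
  let qr : PySem.Set Int :=
    (PySem.List.pyRange 0 p 1).foldl (fun qr x => PySem.Set.add qr (PySem.Int.mod (x*x) p))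
      PySem.Set.empty
  let phi_img : Option (PySem.Set (Int × Int)) :=
    if p ≤ 73 then some (compute_phi_image p) else none
  let counts : PySem.Dict String Int :=
    PySem.Dict.ofList [("0_hit", 0), ("0_miss", 0), ("qr_hit", 0), ("qr_miss", 0),
                       ("nqr_hit", 0), ("nqr_miss", 0)]
  let counts : PySem.Dict String Int :=
    match phi_img with
    | some img =>
      if img ≠ [] then
        (PySem.List.pyRange 0 p 1).foldl (fun counts a =>
          (PySem.List.pyRange 0 p 1).foldl (fun counts b =>
            let s := PySem.Int.mod (a*a + b*b) p
            let hit := PySem.Set.contains img (a, b)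
            if s = 0 then
              counts.modify (if hit then "0_hit" else "0_miss") 0 (· + 1)
            else if PySem.Set.contains qr s then
              counts.modify (if hit then "qr_hit" else "qr_miss") 0 (· + 1)
            else
              counts.modify (if hit then "nqr_hit" else "nqr_miss") 0 (· + 1)) counts) counts
      else counts
    | none => counts
  counts.items

-- ===== PORT B =====
def analyze_qr_structure_alt (p : Int) : List (String × Int) :=
  let qr : PySem.Set Int :=
    (PySem.List.pyRange 0 p 1).foldl (fun qr x => PySem.Set.add qr (PySem.Int.mod (x*x) p))
      PySem.Set.empty
  let phi_img : Option (PySem.Set (Int × Int)) :=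
    if p ≤ 73 then some (compute_phi_image p) else none
  match phi_img with
  | some img =>
    if img ≠ [] then
      -- pass 1: per-class totals over the whole grid (three plain counters)
      let tot : Int × Int × Int :=
        (PySem.List.pyRange 0 p 1).foldl (fun tot a =>
          (PySem.List.pyRange 0 p 1).foldl (fun (tot : Int × Int × Int) b =>
            let s := PySem.Int.mod (a*a + b*b) p
            if s = 0 then (tot.1 + 1, tot.2.1, tot.2.2)
            else if PySem.Set.contains qr s then (tot.1, tot.2.1 + 1, tot.2.2)
            else (tot.1, tot.2.1, tot.2.2 + 1)) tot) (0, 0, 0)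
      -- pass 2: per-class hits, iterating over the elements of phi_img (order-independent sums)
      let hit : Int × Int × Int :=
        img.foldl (fun (hit : Int × Int × Int) ab =>
          let s := PySem.Int.mod (ab.1*ab.1 + ab.2*ab.2) p
          if s = 0 then (hit.1 + 1, hit.2.1, hit.2.2)
          else if PySem.Set.contains qr s then (hit.1, hit.2.1 + 1, hit.2.2)
          else (hit.1, hit.2.1, hit.2.2 + 1)) (0, 0, 0)
      [("0_hit", hit.1), ("0_miss", tot.1 - hit.1),
       ("qr_hit", hit.2.1), ("qr_miss", tot.2.1 - hit.2.1),
       ("nqr_hit", hit.2.2), ("nqr_miss", tot.2.2 - hit.2.2)]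
    else
      [("0_hit", 0), ("0_miss", 0), ("qr_hit", 0), ("qr_miss", 0), ("nqr_hit", 0), ("nqr_miss", 0)]
  | none =>
      [("0_hit", 0), ("0_miss", 0), ("qr_hit", 0), ("qr_miss", 0), ("nqr_hit", 0), ("nqr_miss", 0)]

-- ===== PRECONDITION & SPEC =====
def Spec_analyze_qr_structure (p : Int) (out : List (String × Int)) : Prop := out = analyze_qr_structure_alt p
instance (p : Int) (out : List (String × Int)) : Decidable (Spec_analyze_qr_structure p out) := by unfold Spec_analyze_qr_structure; infer_instance

-- ===== CLAIM (what is proved, stated in full; the proofs are below) =====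
def Claim_equal_analyze_qr_structure : Prop := ∀ (p : Int), Dom_analyze_qr_structure p → Spec_analyze_qr_structure p (analyze_qr_structure p)

-- ===== LEMMAS AND PROOFS =====

-- the grid range(p) x range(p) as one list of pairs
def pvG (p : Int) : List (Int × Int) :=
  (PySem.List.pyRange 0 p 1).flatMap (fun a => (PySem.List.pyRange 0 p 1).map (fun b => (a, b)))

-- the qr set, as built by both ports
def pvQR (p : Int) : PySem.Set Int :=
  (PySem.List.pyRange 0 p 1).foldl (fun qr x => PySem.Set.add qr (PySem.Int.mod (x*x) p))
    PySem.Set.empty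

-- class predicates for a pair (a, b): s == 0 / s in qr / otherwise
def pvC0 (p : Int) (x : Int × Int) : Bool := decide (PySem.Int.mod (x.1*x.1 + x.2*x.2) p = 0)
def pvCq (qr : PySem.Set Int) (p : Int) (x : Int × Int) : Bool :=
  !pvC0 p x && PySem.Set.contains qr (PySem.Int.mod (x.1*x.1 + x.2*x.2) p)
def pvCn (qr : PySem.Set Int) (p : Int) (x : Int × Int) : Bool :=
  !pvC0 p x && !PySem.Set.contains qr (PySem.Int.mod (x.1*x.1 + x.2*x.2) p)

-- A's loop body (on a pair), and B's loop body (used for both of B's passes)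
def pvStepA (qr : PySem.Set Int) (img : PySem.Set (Int × Int)) (p : Int)
    (counts : PySem.Dict String Int) (x : Int × Int) : PySem.Dict String Int :=
  let s := PySem.Int.mod (x.1*x.1 + x.2*x.2) p
  let hit := PySem.Set.contains img x
  if s = 0 then counts.modify (if hit then "0_hit" else "0_miss") 0 (· + 1)
  else if PySem.Set.contains qr s then counts.modify (if hit then "qr_hit" else "qr_miss") 0 (· + 1)
  else counts.modify (if hit then "nqr_hit" else "nqr_miss") 0 (· + 1)

def pvStepT (qr : PySem.Set Int) (p : Int) (t : Int × Int × Int) (x : Int × Int) : Int × Int × Int :=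
  let s := PySem.Int.mod (x.1*x.1 + x.2*x.2) p
  if s = 0 then (t.1 + 1, t.2.1, t.2.2)
  else if PySem.Set.contains qr s then (t.1, t.2.1 + 1, t.2.2)
  else (t.1, t.2.1, t.2.2 + 1)

-- a nested for-loop over two ranges is one fold over the pair list
theorem pvFoldNested {g : Type} (f : g → Int × Int → g) (l1 l2 : List Int) (init : g) :
    l1.foldl (fun c a => l2.foldl (fun c b => f c (a, b)) c) init
      = (l1.flatMap (fun a => l2.map (fun b => (a, b)))).foldl f init := by
  induction l1 generalizing init with
  | nil => rfl
  | cons a t ih => simp [List.foldl_append, List.foldl_map, ih]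

-- membership invariant through a fold that only ever adds elements satisfying Q
theorem pvFoldMem {s a : Type} (f : List s → a → List s) (Q : s → Prop)
    (hf : ∀ acc e y, y ∈ f acc e → y ∈ acc ∨ Q y) :
    ∀ (l : List a) (acc : List s) (y : s), y ∈ l.foldl f acc → y ∈ acc ∨ Q y := by
  intro l
  induction l with
  | nil => intro acc y hy; exact Or.inl hy
  | cons e t ih =>
    intro acc y hy
    rcases ih (f acc e) y hy with h | h
    · exact hf acc e y h
    · exact Or.inr h

-- nodup preserved through a fold whose step preserves nodup
theorem pvFoldNodup {s a : Type} (f : List s → a → List s)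
    (hf : ∀ acc e, acc.Nodup → (f acc e).Nodup) :
    ∀ (l : List a) (acc : List s), acc.Nodup → (l.foldl f acc).Nodup := by
  intro l
  induction l with
  | nil => intro acc h; exact h
  | cons e t ih => intro acc h; exact ih (f acc e) (hf acc e h)

-- every element of phi_img is inside the grid (for 0 < p)
theorem pvPhiBounds (p : Int) (hp : 0 < p) :
    ∀ y ∈ compute_phi_image p, (0 ≤ y.1 ∧ y.1 < p) ∧ (0 ≤ y.2 ∧ y.2 < p) := by
  intro y hy
  have hinner : ∀ (m : Int) (acc : List (Int × Int)) (z : Int × Int),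
      z ∈ (PySem.List.pyRange 0 p 1).foldl (fun image n =>
        if m = 0 ∧ n = 0 then image
        else
          let a := PySem.Int.mod (m*m - n*n) p
          let b := PySem.Int.mod (2*m*n) p
          PySem.Set.add (PySem.Set.add image (a, b)) (b, a)) acc →
      z ∈ acc ∨ ((0 ≤ z.1 ∧ z.1 < p) ∧ (0 ≤ z.2 ∧ z.2 < p)) := by
    intro m acc z hz
    refine pvFoldMem _ (fun w : Int × Int => (0 ≤ w.1 ∧ w.1 < p) ∧ (0 ≤ w.2 ∧ w.2 < p)) ?_ _ acc z hz
    intro acc2 n w hw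
    by_cases h : m = 0 ∧ n = 0
    · rw [if_pos h] at hw; exact Or.inl hw
    · rw [if_neg h] at hw
      simp only at hw
      rcases (PySem.Set.mem_add _ _ _).mp hw with h2 | h2
      · rcases (PySem.Set.mem_add _ _ _).mp h2 with h3 | h3
        · exact Or.inl h3
        · subst h3
          exact Or.inr ⟨⟨PySem.Int.mod_nonneg _ hp, PySem.Int.mod_lt _ hp⟩,
                        ⟨PySem.Int.mod_nonneg _ hp, PySem.Int.mod_lt _ hp⟩⟩
      · subst h2
        exact Or.inr ⟨⟨PySem.Int.mod_nonneg _ hp, PySem.Int.mod_lt _ hp⟩,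
                      ⟨PySem.Int.mod_nonneg _ hp, PySem.Int.mod_lt _ hp⟩⟩
  unfold compute_phi_image at hy
  rcases pvFoldMem _ _ (fun acc m z hz => hinner m acc z hz) _ _ y hy with h | h
  · simp [PySem.Set.empty] at h
  · exact h

-- phi_img has no duplicates (it is built by Set.add from empty)
theorem pvPhiNodup (p : Int) : (compute_phi_image p).Nodup := by
  refine pvFoldNodup _ ?_ _ _ List.nodup_nil
  intro acc m hacc
  refine pvFoldNodup _ ?_ _ _ hacc
  intro acc2 n h2
  by_cases h : m = 0 ∧ n = 0
  · rw [if_pos h]; exact h2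
  · rw [if_neg h]
    exact PySem.Set.nodup_add _ _ (PySem.Set.nodup_add _ _ h2)

-- the grid is duplicate-free
theorem pvGNodup (p : Int) : (pvG p).Nodup :=
  List.Nodup.product (PySem.List.nodup_pyRange_one 0 p) (PySem.List.nodup_pyRange_one 0 p)

-- A's dict-update loop over any pair list, characterised by countP
theorem pvDictLoop (qr : PySem.Set Int) (img : PySem.Set (Int × Int)) (p : Int)
    (l : List (Int × Int)) (c1 c2 c3 c4 c5 c6 : Int) :
    l.foldl (pvStepA qr img p)
      (PySem.Dict.mk [("0_hit", c1), ("0_miss", c2), ("qr_hit", c3), ("qr_miss", c4), ("nqr_hit", c5), ("nqr_miss", c6)])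
    = PySem.Dict.mk
      [("0_hit", c1 + (l.countP (fun x => pvC0 p x && PySem.Set.contains img x) : Int)),
       ("0_miss", c2 + (l.countP (fun x => pvC0 p x && !PySem.Set.contains img x) : Int)),
       ("qr_hit", c3 + (l.countP (fun x => pvCq qr p x && PySem.Set.contains img x) : Int)),
       ("qr_miss", c4 + (l.countP (fun x => pvCq qr p x && !PySem.Set.contains img x) : Int)),
       ("nqr_hit", c5 + (l.countP (fun x => pvCn qr p x && PySem.Set.contains img x) : Int)),
       ("nqr_miss", c6 + (l.countP (fun x => pvCn qr p x && !PySem.Set.contains img x) : Int))] := by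
  induction l generalizing c1 c2 c3 c4 c5 c6 with
  | nil => simp
  | cons x t ih =>
    simp only [List.foldl_cons, List.countP_cons]
    by_cases h0 : PySem.Int.mod (x.1*x.1 + x.2*x.2) p = 0
    · by_cases hh : x ∈ img
      · have e1 : pvStepA qr img p (PySem.Dict.mk [("0_hit", c1), ("0_miss", c2), ("qr_hit", c3), ("qr_miss", c4), ("nqr_hit", c5), ("nqr_miss", c6)]) x
            = PySem.Dict.mk [("0_hit", c1 + 1), ("0_miss", c2), ("qr_hit", c3), ("qr_miss", c4), ("nqr_hit", c5), ("nqr_miss", c6)] := by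
          simp only [pvStepA]; rw [if_pos h0]; rw [if_pos ((PySem.Set.contains_iff _ _).mpr hh)]; rfl
        rw [e1, ih]
        simp [pvC0, pvCq, pvCn, h0, hh]
        try omega

      · have e1 : pvStepA qr img p (PySem.Dict.mk [("0_hit", c1), ("0_miss", c2), ("qr_hit", c3), ("qr_miss", c4), ("nqr_hit", c5), ("nqr_miss", c6)]) x
            = PySem.Dict.mk [("0_hit", c1), ("0_miss", c2 + 1), ("qr_hit", c3), ("qr_miss", c4), ("nqr_hit", c5), ("nqr_miss", c6)] := by
          simp only [pvStepA]; rw [if_pos h0]; rw [if_neg (by simp [hh])]; rfl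
        rw [e1, ih]
        simp [pvC0, pvCq, pvCn, h0, hh]
        try omega

    · by_cases hq : PySem.Int.mod (x.1*x.1 + x.2*x.2) p ∈ qr
      · by_cases hh : x ∈ img
        · have e1 : pvStepA qr img p (PySem.Dict.mk [("0_hit", c1), ("0_miss", c2), ("qr_hit", c3), ("qr_miss", c4), ("nqr_hit", c5), ("nqr_miss", c6)]) x
              = PySem.Dict.mk [("0_hit", c1), ("0_miss", c2), ("qr_hit", c3 + 1), ("qr_miss", c4), ("nqr_hit", c5), ("nqr_miss", c6)] := by
            simp only [pvStepA]; rw [if_neg h0, if_pos ((PySem.Set.contains_iff _ _).mpr hq)]; rw [if_pos ((PySem.Set.contains_iff _ _).mpr hh)]; rfl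
          rw [e1, ih]
          simp [pvC0, pvCq, pvCn, h0, hq, hh]
          try omega

        · have e1 : pvStepA qr img p (PySem.Dict.mk [("0_hit", c1), ("0_miss", c2), ("qr_hit", c3), ("qr_miss", c4), ("nqr_hit", c5), ("nqr_miss", c6)]) x
              = PySem.Dict.mk [("0_hit", c1), ("0_miss", c2), ("qr_hit", c3), ("qr_miss", c4 + 1), ("nqr_hit", c5), ("nqr_miss", c6)] := by
            simp only [pvStepA]; rw [if_neg h0, if_pos ((PySem.Set.contains_iff _ _).mpr hq)]; rw [if_neg (by simp [hh])]; rfl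
          rw [e1, ih]
          simp [pvC0, pvCq, pvCn, h0, hq, hh]
          try omega

      · by_cases hh : x ∈ img
        · have e1 : pvStepA qr img p (PySem.Dict.mk [("0_hit", c1), ("0_miss", c2), ("qr_hit", c3), ("qr_miss", c4), ("nqr_hit", c5), ("nqr_miss", c6)]) x
              = PySem.Dict.mk [("0_hit", c1), ("0_miss", c2), ("qr_hit", c3), ("qr_miss", c4), ("nqr_hit", c5 + 1), ("nqr_miss", c6)] := by
            simp only [pvStepA]; rw [if_neg h0, if_neg (by simp [hq])]; rw [if_pos ((PySem.Set.contains_iff _ _).mpr hh)]; rfl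
          rw [e1, ih]
          simp [pvC0, pvCq, pvCn, h0, hq, hh]
          try omega

        · have e1 : pvStepA qr img p (PySem.Dict.mk [("0_hit", c1), ("0_miss", c2), ("qr_hit", c3), ("qr_miss", c4), ("nqr_hit", c5), ("nqr_miss", c6)]) x
              = PySem.Dict.mk [("0_hit", c1), ("0_miss", c2), ("qr_hit", c3), ("qr_miss", c4), ("nqr_hit", c5), ("nqr_miss", c6 + 1)] := by
            simp only [pvStepA]; rw [if_neg h0, if_neg (by simp [hq])]; rw [if_neg (by simp [hh])]; rfl
          rw [e1, ih]
          simp [pvC0, pvCq, pvCn, h0, hq, hh]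
          try omega


-- B's three-counter loop over any pair list, characterised by countP
theorem pvTripleLoop (qr : PySem.Set Int) (p : Int) (l : List (Int × Int)) (t1 t2 t3 : Int) :
    l.foldl (pvStepT qr p) (t1, t2, t3)
      = (t1 + (l.countP (pvC0 p) : Int), t2 + (l.countP (pvCq qr p) : Int),
         t3 + (l.countP (pvCn qr p) : Int)) := by
  induction l generalizing t1 t2 t3 with
  | nil => simp
  | cons x t ih =>
    simp only [List.foldl_cons, List.countP_cons]
    by_cases h0 : PySem.Int.mod (x.1*x.1 + x.2*x.2) p = 0
    · have e1 : pvStepT qr p (t1, t2, t3) x = (t1 + 1, t2, t3) := by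
        simp only [pvStepT]; rw [if_pos h0]
      rw [e1, ih]
      simp [pvC0, pvCq, pvCn, h0]
      try omega
    · by_cases hq : PySem.Int.mod (x.1*x.1 + x.2*x.2) p ∈ qr
      · have e1 : pvStepT qr p (t1, t2, t3) x = (t1, t2 + 1, t3) := by
          simp only [pvStepT]; rw [if_neg h0, if_pos ((PySem.Set.contains_iff _ _).mpr hq)]
        rw [e1, ih]
        simp [pvC0, pvCq, pvCn, h0, hq]
        try omega
      · have e1 : pvStepT qr p (t1, t2, t3) x = (t1, t2, t3 + 1) := by
          simp only [pvStepT]; rw [if_neg h0, if_neg (by simp [hq])]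
        rw [e1, ih]
        simp [pvC0, pvCq, pvCn, h0, hq]
        try omega

-- counting hits over the grid equals counting over phi_img itself
theorem pvCountTransfer (c : Int × Int → Bool) (p : Int) (img : List (Int × Int))
    (himg : img.Nodup) (hsub : ∀ x ∈ img, x ∈ pvG p) :
    (pvG p).countP (fun x => c x && PySem.Set.contains img x) = img.countP c := by
  have h1 : (pvG p).countP (fun x => c x && PySem.Set.contains img x)
      = ((pvG p).filter (fun x => PySem.Set.contains img x)).countP c :=
    Eq.symm List.countP_filter
  have hperm : ((pvG p).filter (fun x => PySem.Set.contains img x)).Perm img := by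
    rw [List.perm_ext_iff_of_nodup ((pvGNodup p).filter _) himg]
    intro x
    simp only [List.mem_filter]
    constructor
    · rintro ⟨-, h⟩; exact (PySem.Set.contains_iff img x).mp h
    · intro h; exact ⟨hsub x h, (PySem.Set.contains_iff img x).mpr h⟩
  rw [h1, hperm.countP_eq]

-- countP splits along a second test
theorem pvCountSplit {a : Type} (c d : a → Bool) (l : List a) :
    l.countP c = l.countP (fun x => c x && d x) + l.countP (fun x => c x && !d x) := by
  induction l with
  | nil => rfl
  | cons x t ih =>
    simp only [List.countP_cons]
    cases hc : c x <;> cases hd : d x <;> simp <;> omega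

-- range(p) is empty for p <= 0
theorem pvRangeNil (p : Int) (hp : p ≤ 0) : PySem.List.pyRange 0 p 1 = [] := by
  refine List.eq_nil_iff_forall_not_mem.mpr ?_
  intro x hx
  have := PySem.List.mem_pyRange_one.mp hx
  omega

-- ===== VERDICT (by name: the statement is the Claim_ definition above) =====
theorem analyze_qr_structure_spec : Claim_equal_analyze_qr_structure := by
  intro p _
  unfold Spec_analyze_qr_structure
  by_cases h73 : p ≤ 73
  · by_cases himg : compute_phi_image p = []
    · simp [analyze_qr_structure, analyze_qr_structure_alt, h73, himg]
      rfl
    · -- the interesting case: phi_img is nonempty, hence 0 < p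
      have hp : 0 < p := by
        rcases lt_or_ge 0 p with h | h
        · exact h
        · exfalso
          apply himg
          unfold compute_phi_image
          rw [pvRangeNil p (by omega)]
          rfl
      have hA0 : analyze_qr_structure p
          = ((PySem.List.pyRange 0 p 1).foldl (fun c a =>
              (PySem.List.pyRange 0 p 1).foldl (fun c b =>
                pvStepA (pvQR p) (compute_phi_image p) p c (a, b)) c)
              (PySem.Dict.mk [("0_hit", 0), ("0_miss", 0), ("qr_hit", 0), ("qr_miss", 0),
                              ("nqr_hit", 0), ("nqr_miss", 0)])).items := by
        simp only [analyze_qr_structure, if_pos h73]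
        rw [if_pos himg]
        rfl
      have hA : analyze_qr_structure p
          = ((pvG p).foldl (pvStepA (pvQR p) (compute_phi_image p) p)
              (PySem.Dict.mk [("0_hit", 0), ("0_miss", 0), ("qr_hit", 0), ("qr_miss", 0),
                              ("nqr_hit", 0), ("nqr_miss", 0)])).items := by
        rw [hA0, pvFoldNested (pvStepA (pvQR p) (compute_phi_image p) p)]
        rfl
      have hB0 : analyze_qr_structure_alt p
          = (let tot := (PySem.List.pyRange 0 p 1).foldl (fun c a =>
               (PySem.List.pyRange 0 p 1).foldl (fun c b =>
                 pvStepT (pvQR p) p c (a, b)) c) ((0 : Int), (0 : Int), (0 : Int))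
             let hit := (compute_phi_image p).foldl (pvStepT (pvQR p) p)
                          ((0 : Int), (0 : Int), (0 : Int))
             [("0_hit", hit.1), ("0_miss", tot.1 - hit.1),
              ("qr_hit", hit.2.1), ("qr_miss", tot.2.1 - hit.2.1),
              ("nqr_hit", hit.2.2), ("nqr_miss", tot.2.2 - hit.2.2)]) := by
        simp only [analyze_qr_structure_alt, if_pos h73]
        rw [if_pos himg]
        rfl
      have hB : analyze_qr_structure_alt p
          = (let tot := (pvG p).foldl (pvStepT (pvQR p) p) ((0 : Int), (0 : Int), (0 : Int))
             let hit := (compute_phi_image p).foldl (pvStepT (pvQR p) p)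
                          ((0 : Int), (0 : Int), (0 : Int))
             [("0_hit", hit.1), ("0_miss", tot.1 - hit.1),
              ("qr_hit", hit.2.1), ("qr_miss", tot.2.1 - hit.2.1),
              ("nqr_hit", hit.2.2), ("nqr_miss", tot.2.2 - hit.2.2)]) := by
        rw [hB0, pvFoldNested (pvStepT (pvQR p) p)]
        rfl
      rw [hA, hB]
      rw [pvDictLoop, pvTripleLoop, pvTripleLoop]
      have hsub : ∀ x ∈ compute_phi_image p, x ∈ pvG p := by
        intro x hx
        have hb := pvPhiBounds p hp x hx
        have hx2 : (x.1, x.2) ∈ (PySem.List.pyRange 0 p 1) ×ˢ (PySem.List.pyRange 0 p 1) :=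
          List.pair_mem_product.mpr
            ⟨PySem.List.mem_pyRange_one.mpr ⟨hb.1.1, hb.1.2⟩,
             PySem.List.mem_pyRange_one.mpr ⟨hb.2.1, hb.2.2⟩⟩
        exact hx2
      have ht0 := pvCountTransfer (pvC0 p) p (compute_phi_image p) (pvPhiNodup p) hsub
      have htq := pvCountTransfer (pvCq (pvQR p) p) p (compute_phi_image p) (pvPhiNodup p) hsub
      have htn := pvCountTransfer (pvCn (pvQR p) p) p (compute_phi_image p) (pvPhiNodup p) hsub
      have hs0 := pvCountSplit (pvC0 p) (fun x => PySem.Set.contains (compute_phi_image p) x) (pvG p)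
      have hsq := pvCountSplit (pvCq (pvQR p) p) (fun x => PySem.Set.contains (compute_phi_image p) x) (pvG p)
      have hsn := pvCountSplit (pvCn (pvQR p) p) (fun x => PySem.Set.contains (compute_phi_image p) x) (pvG p)
      simp only [List.cons.injEq, Prod.mk.injEq, true_and, and_true]
      omega
  · simp [analyze_qr_structure, analyze_qr_structure_alt, h73]
    rfl
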